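-- pv_equiv track=rewrite | github.com/TEGUHBHS/praxis-academy | kemampuan-dasar/kemampuan-dasar-1/latihan/angka.py | kanan
-- ===== SOURCE A (Python) =====
-- def kanan(i, n):
--     a = ""
--     for j in range(i, n-1):
--         if i == 0:
--             a += "x"
--         elif j < n-2:
--             a += " "
--         else:
--             a += "x"
--     return a
-- ===== SOURCE B (Python) =====
-- def kanan(i, n):
--     L = n - 1 - i
--     if L <= 0:
--         return ""
--     if i == 0:
--         return "x" * L
--     return " " * (L - 1) + "x"
-- ===== Notes on version B (the rewrite author's own statement) =====
-- stated objective: simpler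
-- what changed: Replaces the per-character accumulation loop over range(i, n-1) with a direct closed-form string construction: empty when n-1-i <= 0, all x's when i == 0, otherwise spaces followed by a single final x.
import Mathlib
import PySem

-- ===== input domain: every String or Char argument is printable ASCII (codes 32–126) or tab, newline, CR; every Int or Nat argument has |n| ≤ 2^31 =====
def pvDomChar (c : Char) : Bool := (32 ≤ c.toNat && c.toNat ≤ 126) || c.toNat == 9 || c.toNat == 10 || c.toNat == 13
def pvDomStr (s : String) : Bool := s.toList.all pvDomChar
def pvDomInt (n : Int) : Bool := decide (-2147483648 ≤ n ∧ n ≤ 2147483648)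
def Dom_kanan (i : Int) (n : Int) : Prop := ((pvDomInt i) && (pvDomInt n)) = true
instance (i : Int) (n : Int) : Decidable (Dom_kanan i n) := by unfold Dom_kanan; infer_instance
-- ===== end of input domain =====

-- B replaces A's per-character accumulation loop with a closed-form construction (objective: simpler).

-- ===== PORT A =====
def kanan (i : Int) (n : Int) : String :=
  (PySem.List.pyRange i (n-1) 1).foldl
    (fun a j => if i = 0 then a ++ "x" else if j < n-2 then a ++ " " else a ++ "x") ""

-- ===== PORT B =====
def kanan_alt (i : Int) (n : Int) : String :=
  let L := n - 1 - i
  if L ≤ 0 then ""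
  else if i = 0 then String.ofList (List.replicate L.toNat 'x')
  else String.ofList (List.replicate (L.toNat - 1) ' ') ++ "x"

-- ===== PRECONDITION & SPEC =====
def Spec_kanan (i : Int) (n : Int) (out : String) : Prop := out = kanan_alt i n
instance (i : Int) (n : Int) (out : String) : Decidable (Spec_kanan i n out) := by unfold Spec_kanan; infer_instance

-- ===== CLAIM (what is proved, stated in full; the proofs are below) =====
def Claim_equal_kanan : Prop := ∀ (i : Int) (n : Int), Dom_kanan i n → Spec_kanan i n (kanan i n)

-- ===== LEMMAS AND PROOFS =====

theorem foldl_append_single (c : Char) : ∀ (l : List Int) (s : String),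
    l.foldl (fun a _ => a ++ String.ofList [c]) s = s ++ String.ofList (List.replicate l.length c) := by
  intro l
  induction l with
  | nil => intro s; simp
  | cons x t ih =>
      intro s
      simp only [List.foldl_cons, ih]
      rw [String.append_assoc]
      congr 1
      rw [show (List.replicate (x :: t).length c) = [c] ++ List.replicate t.length c from by
            simp [List.replicate_succ], String.ofList_append]

theorem kanan_spec : Claim_equal_kanan := by
  unfold Claim_equal_kanan Spec_kanan kanan kanan_alt
  intro i n _
  simp only []
  by_cases hL : n - 1 - i ≤ 0
  · rw [PySem.List.pyRange_one_eq_nil (by omega)]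
    simp [hL]
  · rw [if_neg hL]
    by_cases hi : i = 0
    · subst hi
      rw [if_pos rfl]
      have : (fun (a : String) (j : Int) => if (0:Int) = 0 then a ++ "x" else if j < n-2 then a ++ " " else a ++ "x")
           = (fun (a : String) (_ : Int) => a ++ String.ofList ['x']) := by
        funext a j; simp
      rw [this, foldl_append_single]
      simp only [PySem.List.length_pyRange_one, String.empty_append]
    · rw [if_neg hi]
      have hsplit : PySem.List.pyRange i (n-1) 1
          = PySem.List.pyRange i (n-2) 1 ++ [n-2] := by
        rw [PySem.List.pyRange_one_append i (n-2) (n-1) (by omega) (by omega),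
            show PySem.List.pyRange (n-2) (n-1) 1 = [n-2] from by
              rw [show (n-1:Int) = (n-2)+1 from by ring, PySem.List.pyRange_one_singleton]]
      rw [hsplit, List.foldl_append]
      have hpre : (PySem.List.pyRange i (n-2) 1).foldl
            (fun a j => if i = 0 then a ++ "x" else if j < n-2 then a ++ " " else a ++ "x") ""
          = String.ofList (List.replicate ((n-1-i).toNat - 1) ' ') := by
        have hcongr : (PySem.List.pyRange i (n-2) 1).foldl
              (fun a j => if i = 0 then a ++ "x" else if j < n-2 then a ++ " " else a ++ "x") ""
            = (PySem.List.pyRange i (n-2) 1).foldl (fun a _ => a ++ String.ofList [' ']) "" := by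
          apply PySem.List.foldl_congr_mem
          intro a j hj
          have := (PySem.List.mem_pyRange_one).mp hj
          rw [if_neg hi, if_pos (by omega)]
        rw [hcongr, foldl_append_single]
        simp only [PySem.List.length_pyRange_one, String.empty_append]
        congr 2
        omega
      rw [hpre]
      simp only [List.foldl_cons, List.foldl_nil, if_neg hi, if_neg (by omega : ¬ (n-2 < n-2))]

-- ===== VERDICT (by name: the statement is the Claim_ definition above) =====
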